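-- pv_equiv track=rewrite | github.com/prateek/dotfiles | .agents/skills/llms-txt-from-website/scripts/generate_llms_files.py | _category_for_title_and_path
-- ===== SOURCE A (Python) =====
-- def _category_for_title_and_path(title: str, rel_path: str) -> str:
--     t = (title + " " + rel_path).lower()
--     if any(k in t for k in ("reference", "references", "sdk", "cli", "configuration", "config", "schema")):
--         return "Reference"
--     if any(k in t for k in ("tutorial", "guide", "how-to", "how to", "cookbook")):
--         return "Guides"
--     if any(k in t for k in ("example", "examples", "sample")):
--         return "Examples"
--     if any(k in t for k in ("faq", "troubleshooting", "troubleshoot", "errors")):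
--         return "FAQ"
--     if any(k in t for k in ("changelog", "release", "migration")):
--         return "Optional"
--     return "Docs"
-- ===== SOURCE B (Python) =====
-- _KEYWORD_RANK = {
--     "reference": 0, "references": 0, "sdk": 0, "cli": 0,
--     "configuration": 0, "config": 0, "schema": 0,
--     "tutorial": 1, "guide": 1, "how-to": 1, "how to": 1, "cookbook": 1,
--     "example": 2, "examples": 2, "sample": 2,
--     "faq": 3, "troubleshooting": 3, "troubleshoot": 3, "errors": 3,
--     "changelog": 4, "release": 4, "migration": 4,
-- }
-- _CATEGORIES = ("Reference", "Guides", "Examples", "FAQ", "Optional", "Docs")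
--
--
-- def _category_for_title_and_path(title: str, rel_path: str) -> str:
--     t = (title + " " + rel_path).lower()
--     best = len(_CATEGORIES) - 1  # index of the default "Docs"
--     for kw, rank in _KEYWORD_RANK.items():
--         if rank < best and kw in t:
--             best = rank
--     return _CATEGORIES[best]
-- ===== Notes on version B (the rewrite author's own statement) =====
-- stated objective: alternative
-- what changed: Replaces A's five prioritized if/any early-return group checks with a flat keyword-to-priority-rank dict scanned once while keeping a min-rank accumulator, indexing a category tuple by the best rank found.
import Mathlib
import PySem

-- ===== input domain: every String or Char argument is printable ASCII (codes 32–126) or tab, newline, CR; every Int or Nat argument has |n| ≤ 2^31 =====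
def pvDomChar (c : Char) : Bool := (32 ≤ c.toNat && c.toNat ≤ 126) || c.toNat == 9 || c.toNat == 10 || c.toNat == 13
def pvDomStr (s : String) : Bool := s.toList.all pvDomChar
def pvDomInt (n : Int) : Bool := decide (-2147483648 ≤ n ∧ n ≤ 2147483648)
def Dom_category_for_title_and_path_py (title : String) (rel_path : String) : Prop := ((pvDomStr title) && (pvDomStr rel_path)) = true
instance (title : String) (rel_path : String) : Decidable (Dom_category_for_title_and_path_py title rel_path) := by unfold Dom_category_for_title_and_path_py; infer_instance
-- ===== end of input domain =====

-- B replaces A's prioritized early-return group checks with a flat keyword→rank map scanned once with a min-rank accumulator; same behaviour, alternative formulation.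

-- ===== PORT A =====
def category_for_title_and_path_py (title : String) (rel_path : String) : String :=
  let t := PySem.Str.lower (title ++ " " ++ rel_path)
  if ["reference", "references", "sdk", "cli", "configuration", "config", "schema"].any (fun k => PySem.Str.isIn k t) then "Reference"
  else if ["tutorial", "guide", "how-to", "how to", "cookbook"].any (fun k => PySem.Str.isIn k t) then "Guides"
  else if ["example", "examples", "sample"].any (fun k => PySem.Str.isIn k t) then "Examples"
  else if ["faq", "troubleshooting", "troubleshoot", "errors"].any (fun k => PySem.Str.isIn k t) then "FAQ"
  else if ["changelog", "release", "migration"].any (fun k => PySem.Str.isIn k t) then "Optional"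
  else "Docs"

-- ===== PORT B =====
def pvKeywordRank : List (String × Int) :=
  [ ("reference", 0), ("references", 0), ("sdk", 0), ("cli", 0),
    ("configuration", 0), ("config", 0), ("schema", 0),
    ("tutorial", 1), ("guide", 1), ("how-to", 1), ("how to", 1), ("cookbook", 1),
    ("example", 2), ("examples", 2), ("sample", 2),
    ("faq", 3), ("troubleshooting", 3), ("troubleshoot", 3), ("errors", 3),
    ("changelog", 4), ("release", 4), ("migration", 4) ]

def pvCategories : List String := ["Reference", "Guides", "Examples", "FAQ", "Optional", "Docs"]

def category_for_title_and_path_py_alt (title : String) (rel_path : String) : String :=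
  let t := PySem.Str.lower (title ++ " " ++ rel_path)
  let best := pvKeywordRank.foldl
    (fun best kv => if kv.2 < best ∧ PySem.Str.isIn kv.1 t then kv.2 else best)
    ((pvCategories.length : Int) - 1)
  -- indexing _CATEGORIES[best]; best is always in range, the none branch is a totality guard
  (PySem.List.pyGet? pvCategories best).getD ""

-- ===== PRECONDITION & SPEC =====
def Spec_category_for_title_and_path_py (title : String) (rel_path : String) (out : String) : Prop := out = category_for_title_and_path_py_alt title rel_path
instance (title : String) (rel_path : String) (out : String) : Decidable (Spec_category_for_title_and_path_py title rel_path out) := by unfold Spec_category_for_title_and_path_py; infer_instance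

-- ===== CLAIM (what is proved, stated in full; the proofs are below) =====
def Claim_equal_category_for_title_and_path_py : Prop := ∀ (title : String) (rel_path : String), Dom_category_for_title_and_path_py title rel_path → Spec_category_for_title_and_path_py title rel_path (category_for_title_and_path_py title rel_path)

-- ===== LEMMAS AND PROOFS =====

-- the min-rank fold ignores entries whose rank is not below the current best
theorem pvFold_skip (t : String) (l : List (String × Int)) (b : Int)
    (h : ∀ kv ∈ l, b ≤ kv.2) :
    l.foldl (fun best kv => if kv.2 < best ∧ PySem.Str.isIn kv.1 t then kv.2 else best) b = b := by
  induction l with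
  | nil => rfl
  | cons kv l ih =>
    have hb : b ≤ kv.2 := h kv (List.mem_cons_self ..)
    have hn : ¬ (kv.2 < b ∧ PySem.Str.isIn kv.1 t = true) := fun hc => absurd hc.1 (not_lt.mpr hb)
    rw [List.foldl_cons, if_neg hn]
    exact ih fun kv hm => h kv (List.mem_cons_of_mem _ hm)

-- over a constant-rank group with a worse current best, the fold returns the rank iff some keyword matches
theorem pvFold_group (t : String) (l : List (String × Int)) (r b : Int)
    (hr : ∀ kv ∈ l, kv.2 = r) (hb : r < b) :
    l.foldl (fun best kv => if kv.2 < best ∧ PySem.Str.isIn kv.1 t then kv.2 else best) b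
      = if l.any (fun kv => PySem.Str.isIn kv.1 t) then r else b := by
  induction l generalizing b with
  | nil => simp
  | cons kv l ih =>
    have hkv : kv.2 = r := hr kv (List.mem_cons_self ..)
    have htail : ∀ kv ∈ l, kv.2 = r := fun kv hm => hr kv (List.mem_cons_of_mem _ hm)
    by_cases hm : PySem.Str.isIn kv.1 t
    · rw [List.foldl_cons, if_pos ⟨hkv ▸ hb, hm⟩, hkv,
        pvFold_skip t l r (fun kv hm => le_of_eq (htail kv hm).symm)]
      simp only [List.any_cons, hm, Bool.true_or, if_true]
    · have hmf : PySem.Str.isIn kv.1 t = false := by simpa using hm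
      rw [List.foldl_cons, if_neg (fun hc => hm hc.2), ih b htail hb, List.any_cons, hmf,
        Bool.false_or]

-- the fold over the whole keyword table equals the first-matching-group rank
theorem pvBest (t : String) :
    pvKeywordRank.foldl
      (fun best kv => if kv.2 < best ∧ PySem.Str.isIn kv.1 t then kv.2 else best)
      ((pvCategories.length : Int) - 1)
    = (if ["reference", "references", "sdk", "cli", "configuration", "config", "schema"].any (fun k => PySem.Str.isIn k t) then 0
      else if ["tutorial", "guide", "how-to", "how to", "cookbook"].any (fun k => PySem.Str.isIn k t) then 1
      else if ["example", "examples", "sample"].any (fun k => PySem.Str.isIn k t) then 2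
      else if ["faq", "troubleshooting", "troubleshoot", "errors"].any (fun k => PySem.Str.isIn k t) then 3
      else if ["changelog", "release", "migration"].any (fun k => PySem.Str.isIn k t) then 4
      else 5 : Int) := by
  rw [show ((pvCategories.length : Int) - 1) = 5 from rfl]
  rw [show pvKeywordRank =
      [("reference", (0:Int)), ("references", 0), ("sdk", 0), ("cli", 0),
       ("configuration", 0), ("config", 0), ("schema", 0)] ++
      ([("tutorial", 1), ("guide", 1), ("how-to", 1), ("how to", 1), ("cookbook", 1)] ++
      ([("example", 2), ("examples", 2), ("sample", 2)] ++
      ([("faq", 3), ("troubleshooting", 3), ("troubleshoot", 3), ("errors", 3)] ++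
      [("changelog", 4), ("release", 4), ("migration", 4)]))) from rfl]
  rw [List.foldl_append, List.foldl_append, List.foldl_append, List.foldl_append]
  rw [pvFold_group t _ 0 5 (by decide) (by decide)]
  have c0 : (([("reference", (0:Int)), ("references", 0), ("sdk", 0), ("cli", 0),
      ("configuration", 0), ("config", 0), ("schema", 0)]).any (fun kv => PySem.Str.isIn kv.1 t))
      = (["reference", "references", "sdk", "cli", "configuration", "config", "schema"].any (fun k => PySem.Str.isIn k t)) := by
    simp only [List.any_cons, List.any_nil]
  rw [c0]
  by_cases h0 : (["reference", "references", "sdk", "cli", "configuration", "config", "schema"].any (fun k => PySem.Str.isIn k t)) = true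
  · rw [if_pos h0, if_pos h0, pvFold_skip t _ 0 (by decide), pvFold_skip t _ 0 (by decide),
      pvFold_skip t _ 0 (by decide), pvFold_skip t _ 0 (by decide)]
  · rw [if_neg h0, if_neg h0]
    rw [pvFold_group t _ 1 5 (by decide) (by decide)]
    have c1 : (([("tutorial", (1:Int)), ("guide", 1), ("how-to", 1), ("how to", 1), ("cookbook", 1)]).any (fun kv => PySem.Str.isIn kv.1 t))
        = (["tutorial", "guide", "how-to", "how to", "cookbook"].any (fun k => PySem.Str.isIn k t)) := by
      simp only [List.any_cons, List.any_nil]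
    rw [c1]
    by_cases h1 : (["tutorial", "guide", "how-to", "how to", "cookbook"].any (fun k => PySem.Str.isIn k t)) = true
    · rw [if_pos h1, if_pos h1, pvFold_skip t _ 1 (by decide), pvFold_skip t _ 1 (by decide),
        pvFold_skip t _ 1 (by decide)]
    · rw [if_neg h1, if_neg h1]
      rw [pvFold_group t _ 2 5 (by decide) (by decide)]
      have c2 : (([("example", (2:Int)), ("examples", 2), ("sample", 2)]).any (fun kv => PySem.Str.isIn kv.1 t))
          = (["example", "examples", "sample"].any (fun k => PySem.Str.isIn k t)) := by
        simp only [List.any_cons, List.any_nil]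
      rw [c2]
      by_cases h2 : (["example", "examples", "sample"].any (fun k => PySem.Str.isIn k t)) = true
      · rw [if_pos h2, if_pos h2, pvFold_skip t _ 2 (by decide), pvFold_skip t _ 2 (by decide)]
      · rw [if_neg h2, if_neg h2]
        rw [pvFold_group t _ 3 5 (by decide) (by decide)]
        have c3 : (([("faq", (3:Int)), ("troubleshooting", 3), ("troubleshoot", 3), ("errors", 3)]).any (fun kv => PySem.Str.isIn kv.1 t))
            = (["faq", "troubleshooting", "troubleshoot", "errors"].any (fun k => PySem.Str.isIn k t)) := by
          simp only [List.any_cons, List.any_nil]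
        rw [c3]
        by_cases h3 : (["faq", "troubleshooting", "troubleshoot", "errors"].any (fun k => PySem.Str.isIn k t)) = true
        · rw [if_pos h3, if_pos h3, pvFold_skip t _ 3 (by decide)]
        · rw [if_neg h3, if_neg h3]
          rw [pvFold_group t _ 4 5 (by decide) (by decide)]
          have c4 : (([("changelog", (4:Int)), ("release", 4), ("migration", 4)]).any (fun kv => PySem.Str.isIn kv.1 t))
              = (["changelog", "release", "migration"].any (fun k => PySem.Str.isIn k t)) := by
            simp only [List.any_cons, List.any_nil]
          rw [c4]

-- ===== VERDICT (by name: the statement is the Claim_ definition above) =====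
theorem category_for_title_and_path_py_spec : Claim_equal_category_for_title_and_path_py := by
  intro title rel_path _
  unfold Spec_category_for_title_and_path_py category_for_title_and_path_py category_for_title_and_path_py_alt
  simp only [pvBest]
  split_ifs <;> rfl
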